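-- pv_equiv track=rewrite | github.com/kcerauno/SLOT_AND_HMM | hypothesis/04_re-compound_hmm/source/correct_role_analysis.py | collect_groups
-- ===== SOURCE A (Python) =====
-- def get_boundary_positions(splits: tuple) -> tuple:
--     boundary_end, boundary_start = set(), set()
--     cumlen = 0
--     for base in splits[:-1]:
--         cumlen += len(base)
--         boundary_end.add(cumlen - 1)
--         boundary_start.add(cumlen)
--     return boundary_end, boundary_start
--
-- def collect_groups(compound_splits, single_words, decoded_compound, decoded_single) -> dict:
--     b_start, b_end, s_head, s_mid = [], [], [], []
--
--     for word, splits in compound_splits.items():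
--         states = decoded_compound.get(word)
--         if states is None:
--             continue
--         bd_end, bd_start = get_boundary_positions(splits)
--         for pos, state in enumerate(states):
--             if pos in bd_start:
--                 b_start.append(int(state))
--             if pos in bd_end:
--                 b_end.append(int(state))
--
--     for word in single_words:
--         states = decoded_single.get(word)
--         if states is None:
--             continue
--         L = len(states)
--         s_head.append(int(states[0]))
--         s_mid.append(int(states[L // 2]))
--
--     return {"B-start": b_start, "B-end": b_end, "S-head": s_head, "S-mid": s_mid}
-- ===== SOURCE B (Python) =====
-- def collect_groups(compound_splits, single_words, decoded_compound, decoded_single) -> dict: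
--     b_start, b_end = [], []
--     for word, splits in compound_splits.items():
--         states = decoded_compound.get(word)
--         if states is None:
--             continue
--         L = len(states)
--         cums, c = [], 0
--         for base in splits[:-1]:
--             c += len(base)
--             cums.append(c)
--         bounds = list(dict.fromkeys(cums))  # distinct boundaries, ascending
--         b_start.extend(int(states[c]) for c in bounds if c < L)
--         b_end.extend(int(states[c - 1]) for c in bounds if 0 < c <= L)
--     present = [decoded_single[w] for w in single_words if w in decoded_single]
--     s_head = [int(st[0]) for st in present]
--     s_mid = [int(st[len(st) // 2]) for st in present]
--     return {"B-start": b_start, "B-end": b_end, "S-head": s_head, "S-mid": s_mid}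
-- ===== Notes on version B (the rewrite author's own statement) =====
-- stated objective: alternative
-- what changed: Instead of building two boundary-position sets and scanning every position of each compound word's state sequence with membership tests, B computes the deduplicated cumulative-length boundaries once and indexes the state list directly at those offsets (and writes the single-word part as comprehensions); it trades the per-position scan for direct indexing (not measurably faster on the timed input family).
import Mathlib
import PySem

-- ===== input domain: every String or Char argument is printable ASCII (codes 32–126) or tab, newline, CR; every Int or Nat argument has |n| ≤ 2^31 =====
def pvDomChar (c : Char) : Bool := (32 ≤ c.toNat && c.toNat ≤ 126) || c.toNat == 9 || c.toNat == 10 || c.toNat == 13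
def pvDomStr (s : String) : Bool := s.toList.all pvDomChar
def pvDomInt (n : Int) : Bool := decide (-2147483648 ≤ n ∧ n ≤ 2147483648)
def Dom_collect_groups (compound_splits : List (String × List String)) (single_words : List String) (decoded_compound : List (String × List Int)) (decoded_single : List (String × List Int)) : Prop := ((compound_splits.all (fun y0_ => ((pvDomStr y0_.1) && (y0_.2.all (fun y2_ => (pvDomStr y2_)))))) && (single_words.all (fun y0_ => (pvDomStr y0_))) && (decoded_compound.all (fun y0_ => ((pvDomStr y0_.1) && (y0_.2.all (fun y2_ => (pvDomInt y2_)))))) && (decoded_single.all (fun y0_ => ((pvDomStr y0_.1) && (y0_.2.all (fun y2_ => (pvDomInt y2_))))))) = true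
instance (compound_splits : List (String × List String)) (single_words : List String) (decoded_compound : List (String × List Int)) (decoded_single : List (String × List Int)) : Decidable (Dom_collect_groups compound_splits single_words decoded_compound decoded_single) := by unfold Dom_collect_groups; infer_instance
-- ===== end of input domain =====

-- B replaces A's scan of every position of each state sequence (with set-membership tests)
-- by direct indexing at the deduplicated boundary offsets, and writes the single-word part
-- as comprehensions; objective: alternative (a different traversal of the same data).

-- ===== PORT A =====
def get_boundary_positions (splits : List String) : PySem.Set Int × PySem.Set Int :=
  let r := (PySem.List.slice splits none (some (-1))).foldl
    (fun (st : PySem.Set Int × PySem.Set Int × Int) base =>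
      let cumlen := st.2.2 + PySem.Str.len base
      (PySem.Set.add st.1 (cumlen - 1), PySem.Set.add st.2.1 cumlen, cumlen))
    (PySem.Set.empty, PySem.Set.empty, (0 : Int))
  (r.1, r.2.1)

def collect_groups (compound_splits : List (String × List String)) (single_words : List String) (decoded_compound : List (String × List Int)) (decoded_single : List (String × List Int)) : List (String × List Int) :=
  let dc := PySem.Dict.ofList decoded_compound
  let ds := PySem.Dict.ofList decoded_single
  let r1 := (PySem.Dict.ofList compound_splits).items.foldl
    (fun (acc : List Int × List Int) ws =>
      match dc.get? ws.1 with
      | none => acc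
      | some states =>
        let bd := get_boundary_positions ws.2
        (PySem.List.enumerate states).foldl
          (fun acc2 ps =>
            let acc2 := if ps.1 ∈ bd.2 then (acc2.1 ++ [ps.2], acc2.2) else acc2
            if ps.1 ∈ bd.1 then (acc2.1, acc2.2 ++ [ps.2]) else acc2)
          acc)
    ([], [])
  let r2 := single_words.foldl
    (fun (acc : List Int × List Int) w =>
      match ds.get? w with
      | none => acc
      | some states =>
        let L : Int := states.length
        (acc.1 ++ [PySem.List.pyGetD states 0 0],
         acc.2 ++ [PySem.List.pyGetD states (PySem.Int.floordiv L 2) 0]))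
    ([], [])
  [("B-start", r1.1), ("B-end", r1.2), ("S-head", r2.1), ("S-mid", r2.2)]

-- ===== PORT B =====
def collect_groups_alt (compound_splits : List (String × List String)) (single_words : List String) (decoded_compound : List (String × List Int)) (decoded_single : List (String × List Int)) : List (String × List Int) :=
  let dc := PySem.Dict.ofList decoded_compound
  let ds := PySem.Dict.ofList decoded_single
  let r1 := (PySem.Dict.ofList compound_splits).items.foldl
    (fun (acc : List Int × List Int) ws =>
      match dc.get? ws.1 with
      | none => acc
      | some states =>
        let L : Int := states.length
        let cums := ((PySem.List.slice ws.2 none (some (-1))).foldl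
          (fun (st : List Int × Int) base =>
            let c := st.2 + PySem.Str.len base
            (st.1 ++ [c], c)) ([], (0 : Int))).1
        let bounds := PySem.List.dedup cums
        (acc.1 ++ (bounds.filter (fun c => decide (c < L))).map (fun c => PySem.List.pyGetD states c 0),
         acc.2 ++ (bounds.filter (fun c => decide (0 < c) && decide (c ≤ L))).map (fun c => PySem.List.pyGetD states (c - 1) 0)))
    ([], [])
  let present := (single_words.filter (fun w => ds.contains w)).map (fun w => ds.getD w [])
  let s_head := present.map (fun st => PySem.List.pyGetD st 0 0)
  let s_mid := present.map (fun st => PySem.List.pyGetD st (PySem.Int.floordiv (st.length : Int) 2) 0)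
  [("B-start", r1.1), ("B-end", r1.2), ("S-head", s_head), ("S-mid", s_mid)]

-- ===== PRECONDITION & SPEC =====
-- Pre_ excludes only inputs where Python A raises: a single word whose decoded_single entry is
-- the empty state list makes A's states[0] raise IndexError (B raises there too).
def Pre_collect_groups (compound_splits : List (String × List String)) (single_words : List String) (decoded_compound : List (String × List Int)) (decoded_single : List (String × List Int)) : Prop :=
  ∀ w ∈ single_words, (PySem.Dict.ofList decoded_single).get? w ≠ some ([] : List Int)
instance (compound_splits : List (String × List String)) (single_words : List String) (decoded_compound : List (String × List Int)) (decoded_single : List (String × List Int)) : Decidable (Pre_collect_groups compound_splits single_words decoded_compound decoded_single) := by unfold Pre_collect_groups; infer_instance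

def pvWitness_collect_groups : (List (String × List String)) × List String × (List (String × List Int)) × (List (String × List Int)) :=
  ([("ab", ["a", "b"])], ["x"], [("ab", [1, 2])], [("x", [5, 6, 7])])

def Spec_collect_groups (compound_splits : List (String × List String)) (single_words : List String) (decoded_compound : List (String × List Int)) (decoded_single : List (String × List Int)) (out : List (String × List Int)) : Prop := out = collect_groups_alt compound_splits single_words decoded_compound decoded_single
instance (compound_splits : List (String × List String)) (single_words : List String) (decoded_compound : List (String × List Int)) (decoded_single : List (String × List Int)) (out : List (String × List Int)) : Decidable (Spec_collect_groups compound_splits single_words decoded_compound decoded_single out) := by unfold Spec_collect_groups; infer_instance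

-- ===== CLAIM (what is proved, stated in full; the proofs are below) =====
def Claim_equal_collect_groups : Prop := ∀ (compound_splits : List (String × List String)) (single_words : List String) (decoded_compound : List (String × List Int)) (decoded_single : List (String × List Int)), Dom_collect_groups compound_splits single_words decoded_compound decoded_single → Pre_collect_groups compound_splits single_words decoded_compound decoded_single → Spec_collect_groups compound_splits single_words decoded_compound decoded_single (collect_groups compound_splits single_words decoded_compound decoded_single)

-- ===== LEMMAS AND PROOFS =====

-- helpers for the proofs: the prefix-sum (cumulative length) list both loops walk
def cumList : List String → Int → List Int
  | [], _ => []
  | b :: bs, c => (c + PySem.Str.len b) :: cumList bs (c + PySem.Str.len b)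
def lastCum : List String → Int → Int
  | [], c => c
  | b :: bs, c => lastCum bs (c + PySem.Str.len b)

lemma cumList_ge (bl : List String) : ∀ (c : Int), ∀ x ∈ cumList bl c, c ≤ x := by
  induction bl with
  | nil => intro c x hx; simp [cumList] at hx
  | cons b bs ih =>
    intro c x hx
    have hlen : (0 : Int) ≤ PySem.Str.len b := by rw [PySem.Str.len_eq]; positivity
    rcases (by simpa [cumList] using hx : x = c + PySem.Str.len b ∨ x ∈ cumList bs (c + PySem.Str.len b)) with h | h
    · omega
    · have := ih (c + PySem.Str.len b) x h; omega

lemma cumList_pairwise (bl : List String) : ∀ (c : Int), (cumList bl c).Pairwise (· ≤ ·) := by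
  induction bl with
  | nil => intro c; simp [cumList]
  | cons b bs ih =>
    intro c
    refine List.Pairwise.cons ?_ (ih _)
    intro x hx; exact cumList_ge bs _ x hx

lemma dedup_pairwise_lt (xs : List Int) (h : xs.Pairwise (· ≤ ·)) :
    (PySem.List.dedup xs).Pairwise (· < ·) := by
  induction xs with
  | nil => simp [PySem.List.dedup, PySem.Set.ofList]
  | cons x xs ih =>
    show (PySem.Set.ofList (x :: xs)).Pairwise (· < ·)
    rw [PySem.Set.ofList_cons]
    refine List.Pairwise.cons ?_ ?_
    · intro y hy
      rw [PySem.Set.mem_discard] at hy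
      have hmem : y ∈ xs := (PySem.Set.mem_ofList xs y).1 hy.1
      have := List.rel_of_pairwise_cons h hmem
      have := hy.2
      omega
    · show ((PySem.Set.ofList xs).filter _).Pairwise (· < ·)
      exact List.Pairwise.filter _ (ih h.tail)

lemma dedup_map_sub_one (xs : List Int) :
    PySem.List.dedup (xs.map (fun x => x - 1)) = (PySem.List.dedup xs).map (fun x => x - 1) := by
  induction xs with
  | nil => rfl
  | cons x xs ih =>
    show PySem.Set.ofList _ = _
    rw [List.map_cons, PySem.Set.ofList_cons]
    show _ = List.map _ (PySem.Set.ofList (x :: xs))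
    rw [PySem.Set.ofList_cons, List.map_cons]
    congr 1
    rw [show PySem.Set.ofList (List.map (fun x => x - 1) xs) = PySem.List.dedup (xs.map (fun x => x - 1)) from rfl, ih]
    show List.filter _ _ = List.map _ (List.filter _ _)
    rw [List.filter_map]
    congr 1
    apply List.filter_congr
    intro y _
    simp only [Function.comp]
    have : (y - 1 == x - 1) = (y == x) := by
      by_cases h : y = x
      · subst h; simp
      · have : ¬ (y - 1 = x - 1) := by omega
        simp [h, this]
    rw [this]

lemma gbp_fold (bl : List String) : ∀ (s1 s2 : PySem.Set Int) (c : Int),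
    bl.foldl
      (fun (st : PySem.Set Int × PySem.Set Int × Int) base =>
        let cumlen := st.2.2 + PySem.Str.len base
        (PySem.Set.add st.1 (cumlen - 1), PySem.Set.add st.2.1 cumlen, cumlen))
      (s1, s2, c)
    = (PySem.Set.update s1 ((cumList bl c).map (fun x => x - 1)),
       PySem.Set.update s2 (cumList bl c), lastCum bl c) := by
  induction bl with
  | nil => intro s1 s2 c; simp [cumList, lastCum, PySem.Set.update]
  | cons b bs ih =>
    intro s1 s2 c
    simp only [List.foldl_cons, cumList, lastCum, List.map_cons, PySem.Set.update_cons]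
    exact ih _ _ _

lemma gbp_eq (splits : List String) :
    get_boundary_positions splits
    = (PySem.Set.ofList ((cumList (PySem.List.slice splits none (some (-1))) 0).map (fun x => x - 1)),
       PySem.Set.ofList (cumList (PySem.List.slice splits none (some (-1))) 0)) := by
  unfold get_boundary_positions
  rw [gbp_fold]
  simp [PySem.Set.update_nil_left, PySem.Set.empty]

lemma cums_fold (bl : List String) : ∀ (acc : List Int) (c : Int),
    bl.foldl
      (fun (st : List Int × Int) base =>
        let c := st.2 + PySem.Str.len base
        (st.1 ++ [c], c)) (acc, c)
    = (acc ++ cumList bl c, lastCum bl c) := by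
  induction bl with
  | nil => intro acc c; simp [cumList, lastCum]
  | cons b bs ih =>
    intro acc c
    simp only [List.foldl_cons, cumList, lastCum]
    rw [ih]
    simp

lemma enum_filter_eq (states : List Int) (d : List Int) (hd : d.Pairwise (· < ·)) :
    (PySem.List.enumerate states).filter (fun ps => decide (ps.1 ∈ d))
    = (d.filter (fun c => decide (0 ≤ c ∧ c < (states.length : Int)))).map
        (fun c => (c, states.getD c.toNat 0)) := by
  apply List.eq_of_perm_of_sorted (le := fun (p q : Int × Int) => p.1 < q.1)
  · intro a b _ _ h1 h2; omega
  · exact List.Pairwise.filter _ (PySem.List.pairwise_lt_enumerate states 0)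
  · rw [List.pairwise_map]
    exact List.Pairwise.filter _ hd
  · have h1 : (List.filter (fun ps => decide (ps.1 ∈ d)) (PySem.List.enumerate states)).Nodup := by
      apply List.Pairwise.imp (R := fun (p q : Int × Int) => p.1 < q.1)
      · intro a b h heq; rw [heq] at h; omega
      · exact List.Pairwise.filter _ (PySem.List.pairwise_lt_enumerate states 0)
    have h2 : ((d.filter (fun c => decide (0 ≤ c ∧ c < (states.length : Int)))).map
        (fun c => ((c, states.getD c.toNat 0) : Int × Int))).Nodup := by
      apply List.Pairwise.imp (R := fun (p q : Int × Int) => p.1 < q.1)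
      · intro a b h heq; rw [heq] at h; omega
      · rw [List.pairwise_map]; exact List.Pairwise.filter _ hd
    rw [List.perm_ext_iff_of_nodup h1 h2]
    intro p
    rw [List.mem_filter, List.mem_map, PySem.List.mem_enumerate_iff]
    constructor
    · rintro ⟨⟨k, hk, rfl⟩, hmem⟩
      refine ⟨(k : Int), ?_, ?_⟩
      · rw [List.mem_filter]
        constructor
        · simpa using hmem
        · simp; omega
      · simp [List.getElem?_eq_getElem hk]
    · rintro ⟨c, hc, rfl⟩
      rw [List.mem_filter] at hc
      obtain ⟨hcd, hcr⟩ := hc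
      have hcr' : 0 ≤ c ∧ c < (states.length : Int) := by simpa using hcr
      have hk : c.toNat < states.length := by omega
      constructor
      · refine ⟨c.toNat, hk, ?_⟩
        simp [List.getElem?_eq_getElem hk]
        omega
      · simpa using hcd

lemma word_core (states : List Int) (splits : List String) (acc : List Int × List Int) :
    (PySem.List.enumerate states).foldl
      (fun acc2 ps =>
        let acc2 := if ps.1 ∈ (get_boundary_positions splits).2 then (acc2.1 ++ [ps.2], acc2.2) else acc2
        if ps.1 ∈ (get_boundary_positions splits).1 then (acc2.1, acc2.2 ++ [ps.2]) else acc2)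
      acc
    = (acc.1 ++ ((PySem.List.dedup (cumList (PySem.List.slice splits none (some (-1))) 0)).filter
          (fun c => decide (c < (states.length : Int)))).map (fun c => PySem.List.pyGetD states c 0),
       acc.2 ++ ((PySem.List.dedup (cumList (PySem.List.slice splits none (some (-1))) 0)).filter
          (fun c => decide (0 < c) && decide (c ≤ (states.length : Int)))).map
          (fun c => PySem.List.pyGetD states (c - 1) 0)) := by
  obtain ⟨a1, a2⟩ := acc
  set bl := PySem.List.slice splits none (some (-1)) with hbl
  set cums := cumList bl 0 with hcums
  set d := PySem.List.dedup cums with hd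
  set L : Int := (states.length : Int) with hL
  have hnn : ∀ c ∈ d, (0 : Int) ≤ c := fun c hc =>
    cumList_ge bl 0 c ((PySem.List.mem_dedup cums c).1 hc)
  have hdlt : d.Pairwise (· < ·) := dedup_pairwise_lt cums (cumList_pairwise bl 0)
  have hstep : (fun (acc2 : List Int × List Int) (ps : Int × Int) =>
        let acc2 := if ps.1 ∈ (get_boundary_positions splits).2 then (acc2.1 ++ [ps.2], acc2.2) else acc2
        if ps.1 ∈ (get_boundary_positions splits).1 then (acc2.1, acc2.2 ++ [ps.2]) else acc2)
      = (fun (acc2 : List Int × List Int) (ps : Int × Int) =>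
        ((fun (a : List Int) (ps : Int × Int) => if ps.1 ∈ (get_boundary_positions splits).2 then a ++ [ps.2] else a) acc2.1 ps,
         (fun (a : List Int) (ps : Int × Int) => if ps.1 ∈ (get_boundary_positions splits).1 then a ++ [ps.2] else a) acc2.2 ps)) := by
    funext acc2 ps; dsimp only; split_ifs <;> rfl
  rw [hstep, PySem.List.foldl_prod_mk
      (f := fun (a : List Int) (ps : Int × Int) => if ps.1 ∈ (get_boundary_positions splits).2 then a ++ [ps.2] else a)
      (g := fun (a : List Int) (ps : Int × Int) => if ps.1 ∈ (get_boundary_positions splits).1 then a ++ [ps.2] else a)]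
  simp only [Prod.mk.injEq]
  have hS2 : (get_boundary_positions splits).2 = d := by rw [gbp_eq]; rfl
  have hS1 : (get_boundary_positions splits).1 = d.map (fun x => x - 1) := by
    rw [gbp_eq]
    show PySem.List.dedup (cums.map (fun x => x - 1)) = _
    exact dedup_map_sub_one cums
  constructor
  · -- b_start component
    rw [hS2, PySem.List.foldl_append_ite (p := fun ps : Int × Int => ps.1 ∈ d) (f := fun ps : Int × Int => ps.2)]
    congr 1
    rw [enum_filter_eq states d hdlt, List.map_map]
    rw [List.filter_congr (fun c hc => by
      rw [decide_eq_decide.mpr (show (0 ≤ c ∧ c < L) ↔ (c < L) by have := hnn c hc; omega)])]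
    apply List.map_congr_left
    intro c hc
    rw [List.mem_filter] at hc
    have h0 : (0 : Int) ≤ c := hnn c hc.1
    have h1 : c < L := by simpa using hc.2
    simp only [Function.comp]
    rw [PySem.List.pyGetD_eq_getElem states 0 h0 h1, List.getD_eq_getElem]
  · -- b_end component
    rw [hS1, PySem.List.foldl_append_ite (p := fun ps : Int × Int => ps.1 ∈ d.map (fun x => x - 1)) (f := fun ps : Int × Int => ps.2)]
    congr 1
    have hdlt' : (d.map (fun x => x - 1)).Pairwise (· < ·) := by
      rw [List.pairwise_map]; exact hdlt.imp (by omega)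
    rw [enum_filter_eq states _ hdlt', List.map_map, List.filter_map, List.map_map]
    rw [List.filter_congr (fun c hc => by
      show decide (0 ≤ c - 1 ∧ c - 1 < L) = (decide (0 < c) && decide (c ≤ L))
      rw [decide_eq_decide.mpr (show (0 ≤ c - 1 ∧ c - 1 < L) ↔ (0 < c ∧ c ≤ L) by omega), Bool.decide_and])]
    apply List.map_congr_left
    intro c hc
    rw [List.mem_filter] at hc
    have h01 : (0 : Int) < c ∧ c ≤ L := by simpa using hc.2
    simp only [Function.comp]
    rw [PySem.List.pyGetD_eq_getElem states 0 (by omega) (by omega), List.getD_eq_getElem]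

lemma singles_eq (ds : PySem.Dict String (List Int)) (sw : List String) :
    sw.foldl
      (fun (acc : List Int × List Int) w =>
        match ds.get? w with
        | none => acc
        | some states =>
          let L : Int := states.length
          (acc.1 ++ [PySem.List.pyGetD states 0 0],
           acc.2 ++ [PySem.List.pyGetD states (PySem.Int.floordiv L 2) 0]))
      ([], [])
    = (((sw.filter (fun w => ds.contains w)).map (fun w => ds.getD w [])).map
         (fun st => PySem.List.pyGetD st 0 0),
       ((sw.filter (fun w => ds.contains w)).map (fun w => ds.getD w [])).map
         (fun st => PySem.List.pyGetD st (PySem.Int.floordiv (st.length : Int) 2) 0)) := by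
  have hstep : (fun (acc : List Int × List Int) w =>
        match ds.get? w with
        | none => acc
        | some states =>
          let L : Int := states.length
          (acc.1 ++ [PySem.List.pyGetD states 0 0],
           acc.2 ++ [PySem.List.pyGetD states (PySem.Int.floordiv L 2) 0]))
      = (fun (acc : List Int × List Int) w =>
        ((fun (a : List Int) w => if ds.contains w then a ++ [PySem.List.pyGetD (ds.getD w []) 0 0] else a) acc.1 w,
         (fun (a : List Int) w => if ds.contains w then a ++ [PySem.List.pyGetD (ds.getD w []) (PySem.Int.floordiv ((ds.getD w []).length : Int) 2) 0] else a) acc.2 w)) := by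
    funext acc w
    rcases h : ds.get? w with _ | states
    · have hc : ds.contains w = false := by rw [PySem.Dict.contains_eq_isSome_get?, h]; rfl
      simp [hc]
    · have hc : ds.contains w = true := by rw [PySem.Dict.contains_eq_isSome_get?, h]; rfl
      have hg : ds.getD w [] = states := by rw [PySem.Dict.getD_eq_get?_getD, h]; rfl
      simp [hc, hg]
  rw [hstep, PySem.List.foldl_prod_mk
      (f := fun (a : List Int) w => if ds.contains w then a ++ [PySem.List.pyGetD (ds.getD w []) 0 0] else a)
      (g := fun (a : List Int) w => if ds.contains w then a ++ [PySem.List.pyGetD (ds.getD w []) (PySem.Int.floordiv ((ds.getD w []).length : Int) 2) 0] else a)]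
  rw [PySem.List.foldl_append_if (p := fun w => ds.contains w) (f := fun w => PySem.List.pyGetD (ds.getD w []) 0 0),
      PySem.List.foldl_append_if (p := fun w => ds.contains w) (f := fun w => PySem.List.pyGetD (ds.getD w []) (PySem.Int.floordiv ((ds.getD w []).length : Int) 2) 0)]
  simp [List.map_map, Function.comp]

-- the per-compound-word steps of the two outer folds agree
lemma word_step_eq (dc : PySem.Dict String (List Int)) (acc : List Int × List Int) (ws : String × List String) :
    (match dc.get? ws.1 with
     | none => acc
     | some states =>
       let bd := get_boundary_positions ws.2
       (PySem.List.enumerate states).foldl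
         (fun acc2 ps =>
           let acc2 := if ps.1 ∈ bd.2 then (acc2.1 ++ [ps.2], acc2.2) else acc2
           if ps.1 ∈ bd.1 then (acc2.1, acc2.2 ++ [ps.2]) else acc2)
         acc)
    = (match dc.get? ws.1 with
       | none => acc
       | some states =>
         let L : Int := states.length
         let cums := ((PySem.List.slice ws.2 none (some (-1))).foldl
           (fun (st : List Int × Int) base =>
             let c := st.2 + PySem.Str.len base
             (st.1 ++ [c], c)) ([], (0 : Int))).1
         let bounds := PySem.List.dedup cums
         (acc.1 ++ (bounds.filter (fun c => decide (c < L))).map (fun c => PySem.List.pyGetD states c 0),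
          acc.2 ++ (bounds.filter (fun c => decide (0 < c) && decide (c ≤ L))).map (fun c => PySem.List.pyGetD states (c - 1) 0))) := by
  rcases h : dc.get? ws.1 with _ | states
  · rfl
  · simp only [cums_fold (PySem.List.slice ws.2 none (some (-1))) [] 0, List.nil_append]
    exact word_core states ws.2 acc

-- ===== VERDICT (by name: the statement is the Claim_ definition above) =====
theorem collect_groups_spec : Claim_equal_collect_groups := by
  intro compound_splits single_words decoded_compound decoded_single _ _
  show collect_groups compound_splits single_words decoded_compound decoded_single
     = collect_groups_alt compound_splits single_words decoded_compound decoded_single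
  unfold collect_groups collect_groups_alt
  have h1 := PySem.List.foldl_congr_mem (PySem.Dict.ofList compound_splits).items _ _
    (([], []) : List Int × List Int)
    (fun acc ws _ => word_step_eq (PySem.Dict.ofList decoded_compound) acc ws)
  have h2 := singles_eq (PySem.Dict.ofList decoded_single) single_words
  simp only [] at h1 h2 ⊢
  rw [h1, h2]
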